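-- pv_equiv track=rewrite | github.com/masonsbro/fall-2017-solutions | 9-22/8/ac/arnav_fenwick.py | solve
-- ===== SOURCE A (Python) =====
-- MOD = 1000000007
--
-- MAX_SALARY = 100005
--
-- def add(f_tree, index, delta):
--     x = index
--     while x < MAX_SALARY:
--         f_tree[x] += delta
--         x += (x & (-x))
--
-- def query(f_tree, index):
--     ans = 0
--     x = index
--     while x > 0:
--         ans += f_tree[x]
--         x -= (x & (-x))
--
--     return ans
--
-- def solve(people, k, d):
--     if not people:
--         return 0
--
--     people.sort()
--     n = len(people)
--
--     # pointer to the youngest person whose age is still valid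
--     lower_ptr = 0
--
--     ans = 0
--
--     # Fenwick tree
--     f_tree = [0] * MAX_SALARY
--
--     add(f_tree, people[0][1], 1)
--
--     # iterate over each person and figure out how many people before them they
--     # can date.
--     for i in range(1, n):
--         age, salary = people[i]
--         # increment the lower ptr to get in range
--         while lower_ptr < i and people[lower_ptr][0] < (age // 2) - k:
--             add(f_tree, people[lower_ptr][1], -1)
--             lower_ptr += 1
--
--         # Now that the ages are valid, find people with valid salaries
--
--         min_salary = max(0, salary - d)
--         max_salary = min(MAX_SALARY - 1, salary + d)
--
--         ans += query(f_tree, max_salary)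
--         ans -= query(f_tree, min_salary - 1)
--
--         # Add your salary to the fenwick tree
--         add(f_tree, salary, 1)
--
--     return ans % MOD
-- ===== SOURCE B (Python) =====
-- MOD = 1000000007
--
-- MAX_SALARY = 100005
--
-- def solve(people, k, d):
--     # Same answer as the Fenwick-tree version, but counting directly:
--     # for each person i (in sorted order), scan the age-valid window
--     # people[ptr:i] and count partners with salary <= hi minus those with
--     # salary < lo (the two prefix counts the Fenwick queries compute).
--     if not people:
--         return 0
--
--     people.sort()
--     n = len(people)
--     ptr = 0
--     ans = 0
--
--     for i in range(1, n):
--         age, salary = people[i]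
--         while ptr < i and people[ptr][0] < (age // 2) - k:
--             ptr += 1
--
--         lo = max(0, salary - d)
--         hi = min(MAX_SALARY - 1, salary + d)
--
--         for _, s in people[ptr:i]:
--             if s <= hi:
--                 ans += 1
--             if s < lo:
--                 ans -= 1
--
--     return ans % MOD
-- ===== Notes on version B (the rewrite author's own statement) =====
-- stated objective: simpler
-- what changed: Replaces the Fenwick tree (100005-slot array with bitwise add/query and prefix-sum differencing) by a direct scan of the current age-valid window people[ptr:i], counting partners with salary <= hi minus those with salary < lo; the sliding pointer and sort are kept, the tree and all bit manipulation disappear.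
import Mathlib
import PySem

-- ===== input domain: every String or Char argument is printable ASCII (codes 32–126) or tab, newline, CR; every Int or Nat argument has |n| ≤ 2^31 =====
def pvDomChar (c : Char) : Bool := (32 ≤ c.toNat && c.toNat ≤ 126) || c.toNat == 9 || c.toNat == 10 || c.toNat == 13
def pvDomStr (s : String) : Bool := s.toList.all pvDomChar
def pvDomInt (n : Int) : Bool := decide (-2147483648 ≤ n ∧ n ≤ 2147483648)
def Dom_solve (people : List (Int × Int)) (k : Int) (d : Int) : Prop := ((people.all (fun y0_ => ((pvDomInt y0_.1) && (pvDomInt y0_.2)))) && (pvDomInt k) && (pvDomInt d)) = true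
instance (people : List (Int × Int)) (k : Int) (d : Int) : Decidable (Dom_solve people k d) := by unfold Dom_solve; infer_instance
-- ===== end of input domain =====

-- B replaces A's Fenwick tree with a direct scan of the age-valid window (same sort,
-- same sliding pointer, same return value); like A, B sorts `people` in place.

-- lowest set bit of x, ported from Python's `x & (-x)`
def lowbit (x : Int) : Int := PySem.Int.band x (-x)

-- Nat form of the lowest set bit, used by the proofs and by the termination arguments
def lbN (n : Nat) : Nat := n - (n &&& (n - 1))

theorem lowbit_eq_lbN (x : Int) (hx : 1 ≤ x) : lowbit x = ((lbN x.toNat : Nat) : Int) := by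
  have h0 : (0 : Int) ≤ x := by omega
  have h1 : ¬ (0 : Int) ≤ -x := by omega
  unfold lowbit PySem.Int.band
  rw [if_pos h0, if_neg h1]
  have h2 : (-(-x) - 1).toNat = x.toNat - 1 := by omega
  rw [h2]
  rfl

theorem lowbit_pos (x : Int) (hx : 1 ≤ x) : 1 ≤ lowbit x := by
  rw [lowbit_eq_lbN x hx]
  have h1 : x.toNat &&& (x.toNat - 1) ≤ x.toNat - 1 := Nat.and_le_right
  have h2 : 1 ≤ x.toNat := by omega
  unfold lbN; omega

theorem lowbit_le (x : Int) (hx : 1 ≤ x) : lowbit x ≤ x := by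
  rw [lowbit_eq_lbN x hx]
  have h1 : x.toNat &&& (x.toNat - 1) ≤ x.toNat := Nat.and_le_left
  unfold lbN; omega

-- ===== PORT A =====

-- `add(f_tree, index, delta)`.  The `1 ≤ x` conjunct is a totality guard only:
-- for x ≤ 0 Python's loop never terminates (those inputs are outside Pre_solve).
def addAux (t : List Int) (x : Int) (δ : Int) : List Int :=
  if h : x < 100005 ∧ 1 ≤ x then
    addAux (PySem.List.pySetD t x (PySem.List.pyGetD t x 0 + δ)) (x + lowbit x) δ
  else t
termination_by (100005 - x).toNat
decreasing_by
  have := lowbit_pos x h.2; omega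

-- `query(f_tree, index)` with accumulator `ans`.  `pyGetD _ _ 0` is Python's
-- `f_tree[x]`; under Pre_solve every query index is < 100005, so it is in range.
def queryAux (t : List Int) (x : Int) (acc : Int) : Int :=
  if h : 0 < x then queryAux t (x - lowbit x) (acc + PySem.List.pyGetD t x 0) else acc
termination_by x.toNat
decreasing_by
  have h1 := lowbit_pos x (by omega)
  have h2 := lowbit_le x (by omega)
  omega

-- the inner `while lower_ptr < i and people[lower_ptr][0] < (age // 2) - k` loop of A
def advanceA (sp : List (Int × Int)) (i T : Int) (ptr : Int) (t : List Int) : Int × List Int :=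
  if h : ptr < i ∧ (PySem.List.pyGetD sp ptr (0, 0)).1 < T then
    advanceA sp i T (ptr + 1) (addAux t (PySem.List.pyGetD sp ptr (0, 0)).2 (-1))
  else (ptr, t)
termination_by (i - ptr).toNat
decreasing_by omega

-- one iteration of A's `for i in range(1, n)` loop; state = (lower_ptr, ans, f_tree)
def stepA (sp : List (Int × Int)) (k d : Int) (st : Int × Int × List Int) (i : Int) : Int × Int × List Int :=
  let age := (PySem.List.pyGetD sp i (0, 0)).1
  let salary := (PySem.List.pyGetD sp i (0, 0)).2
  let pt := advanceA sp i (PySem.Int.floordiv age 2 - k) st.1 st.2.2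
  let minS := max 0 (salary - d)
  let maxS := min (100005 - 1) (salary + d)
  let ans := st.2.1 + queryAux pt.2 maxS 0 - queryAux pt.2 (minS - 1) 0
  (pt.1, ans, addAux pt.2 salary 1)

def solve (people : List (Int × Int)) (k : Int) (d : Int) : Int :=
  if people = [] then 0
  else
    let sp := PySem.List.sorted2 people Prod.fst Prod.snd false
    let n := PySem.List.len sp
    let t0 := addAux (List.replicate 100005 0) (PySem.List.pyGetD sp 0 (0, 0)).2 1
    let st := (PySem.List.pyRange 1 n 1).foldl (stepA sp k d) (0, 0, t0)
    PySem.Int.mod st.2.1 1000000007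

-- ===== PORT B =====

-- the same inner `while` loop (B keeps the sliding pointer, but no tree)
def advanceB (sp : List (Int × Int)) (i T : Int) (ptr : Int) : Int :=
  if h : ptr < i ∧ (PySem.List.pyGetD sp ptr (0, 0)).1 < T then
    advanceB sp i T (ptr + 1)
  else ptr
termination_by (i - ptr).toNat
decreasing_by omega

-- one iteration of B's loop; state = (ptr, ans); the window people[ptr:i] is scanned directly
def stepB (sp : List (Int × Int)) (k d : Int) (st : Int × Int) (i : Int) : Int × Int :=
  let age := (PySem.List.pyGetD sp i (0, 0)).1
  let salary := (PySem.List.pyGetD sp i (0, 0)).2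
  let ptr := advanceB sp i (PySem.Int.floordiv age 2 - k) st.1
  let lo := max 0 (salary - d)
  let hi := min (100005 - 1) (salary + d)
  let ans := (PySem.List.slice sp (some ptr) (some i)).foldl
    (fun a q =>
      let a' := if q.2 ≤ hi then a + 1 else a
      if q.2 < lo then a' - 1 else a') st.2
  (ptr, ans)

def solve_alt (people : List (Int × Int)) (k : Int) (d : Int) : Int :=
  if people = [] then 0
  else
    let sp := PySem.List.sorted2 people Prod.fst Prod.snd false
    let n := PySem.List.len sp
    let st := (PySem.List.pyRange 1 n 1).foldl (stepB sp k d) (0, 0)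
    PySem.Int.mod st.2 1000000007

-- ===== PRECONDITION & SPEC =====
-- Pre_ excludes exactly the inputs on which Python's A never returns a value: a
-- salary ≤ 0 makes the Fenwick `add` loop forever, and a person whose salary s has
-- s - d ≥ 100006 makes `query(f_tree, min_salary - 1)` raise IndexError at that
-- person's own iteration — unless that person is the unique tuple-minimum of the
-- list (then it sorts first, is never queried, and A returns: such inputs are
-- INSIDE Pre_ and proved equal).
def Pre_solve (people : List (Int × Int)) (k : Int) (d : Int) : Prop :=
  (∀ p ∈ people, 1 ≤ p.2) ∧
  ∀ p ∈ people, 100006 + d ≤ p.2 →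
    people.count p = 1 ∧ ∀ q ∈ people, q = p ∨ (p.1 < q.1 ∨ (p.1 = q.1 ∧ p.2 < q.2))
instance (people : List (Int × Int)) (k : Int) (d : Int) : Decidable (Pre_solve people k d) := by
  unfold Pre_solve; infer_instance

def pvWitness_solve : (List (Int × Int)) × Int × Int := ([(10, 3), (11, 4), (12, 9)], 2, 3)

def Spec_solve (people : List (Int × Int)) (k : Int) (d : Int) (out : Int) : Prop := out = solve_alt people k d
instance (people : List (Int × Int)) (k : Int) (d : Int) (out : Int) : Decidable (Spec_solve people k d out) := by unfold Spec_solve; infer_instance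

-- ===== CLAIM (what is proved, stated in full; the proofs are below) =====
def Claim_equal_solve : Prop := ∀ (people : List (Int × Int)) (k : Int) (d : Int), Dom_solve people k d → Pre_solve people k d → Spec_solve people k d (solve people k d)

-- ===== LEMMAS AND PROOFS =====

-- ---- bit-level facts about lbN ----

theorem land_two_mul (a : Nat) (ha : 1 ≤ a) : (2 * a) &&& (2 * a - 1) = 2 * (a &&& (a - 1)) := by
  have h21 : 2 * a - 1 = 2 * (a - 1) + 1 := by omega
  apply Nat.eq_of_testBit_eq
  intro i
  cases i with
  | zero =>
    rw [Nat.testBit_land]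
    simp [Nat.testBit_zero, h21, Nat.mul_mod_right]
  | succ i =>
    rw [Nat.testBit_land, Nat.testBit_succ, Nat.testBit_succ, Nat.testBit_succ]
    have e1 : 2 * a / 2 = a := by omega
    have e2 : (2 * a - 1) / 2 = a - 1 := by omega
    have e3 : 2 * (a &&& (a - 1)) / 2 = a &&& (a - 1) := by omega
    rw [e1, e2, e3, ← Nat.testBit_land]

theorem lbN_odd (m : Nat) (hm : m % 2 = 1) : lbN m = 1 := by
  obtain ⟨t, rfl⟩ : ∃ t, m = 2 * t + 1 := ⟨m / 2, by omega⟩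
  have key : (2 * t + 1) &&& (2 * t) = 2 * t := by
    apply Nat.eq_of_testBit_eq
    intro i
    cases i with
    | zero =>
      rw [Nat.testBit_land]
      simp [Nat.testBit_zero, Nat.mul_mod_right]
    | succ i =>
      rw [Nat.testBit_land, Nat.testBit_succ, Nat.testBit_succ]
      have e1 : (2 * t + 1) / 2 = t := by omega
      have e2 : 2 * t / 2 = t := by omega
      rw [e1, e2, Bool.and_self]
  unfold lbN
  have h1 : 2 * t + 1 - 1 = 2 * t := by omega
  rw [h1, key]
  omega

theorem lbN_two_mul (a : Nat) : lbN (2 * a) = 2 * lbN a := by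
  rcases Nat.eq_zero_or_pos a with rfl | ha
  · simp [lbN]
  · have h1 : a &&& (a - 1) ≤ a := Nat.and_le_left
    unfold lbN
    rw [land_two_mul a ha]
    omega

theorem lbN_two_pow_mul (k m : Nat) (hm : m % 2 = 1) : lbN (2 ^ k * m) = 2 ^ k := by
  induction k with
  | zero => simpa using lbN_odd m hm
  | succ k ih =>
    have e : 2 ^ (k + 1) * m = 2 * (2 ^ k * m) := by ring
    rw [e, lbN_two_mul, ih, pow_succ]
    ring

theorem lbN_decomp (n : Nat) (h : 0 < n) :
    ∃ k m, m % 2 = 1 ∧ n = 2 ^ k * m ∧ lbN n = 2 ^ k := by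
  obtain ⟨k, m, hm, he⟩ := Nat.exists_eq_two_pow_mul_odd (n := n) (by omega)
  exact ⟨k, m, Nat.odd_iff.mp hm, he, by rw [he]; exact lbN_two_pow_mul k m (Nat.odd_iff.mp hm)⟩

theorem lbN_pos (n : Nat) (h : 1 ≤ n) : 1 ≤ lbN n := by
  have h1 : n &&& (n - 1) ≤ n - 1 := Nat.and_le_right
  unfold lbN; omega

theorem lbN_le (n : Nat) : lbN n ≤ n := by
  unfold lbN; omega

theorem lbN_nest (s : Nat) (hs : 0 < s) : s + lbN s - lbN (s + lbN s) ≤ s - lbN s := by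
  obtain ⟨k, m, hm, rfl, hlb⟩ := lbN_decomp s hs
  rw [hlb]
  have hm1 : 0 < m + 1 := by omega
  obtain ⟨j, m', hm', he, _⟩ := lbN_decomp (m + 1) hm1
  have hj : 1 ≤ j := by
    by_contra hj0
    have hj1 : j = 0 := by omega
    subst hj1
    simp at he
    omega
  have e : 2 ^ k * m + 2 ^ k = 2 ^ (k + j) * m' := by
    rw [pow_add]
    calc 2 ^ k * m + 2 ^ k = 2 ^ k * (m + 1) := by ring
    _ = 2 ^ k * (2 ^ j * m') := by rw [he]
    _ = 2 ^ k * 2 ^ j * m' := by ring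
  rw [e, lbN_two_pow_mul (k + j) m' hm']
  have epow : (2:Nat) ^ (k + j) = 2 ^ k * 2 ^ j := pow_add 2 k j
  have h2j : 2 ≤ 2 ^ j := by
    calc (2:Nat) = 2 ^ 1 := by norm_num
    _ ≤ 2 ^ j := Nat.pow_le_pow_right (by norm_num) hj
  have hA2 : 2 ^ k * 2 ≤ 2 ^ k * 2 ^ j := Nat.mul_le_mul_left _ h2j
  omega

theorem lbN_between (s p : Nat) (hs : 0 < s) (h1 : s < p) (h2 : p < s + lbN s) : lbN p ≤ p - s := by
  obtain ⟨k, m, hm, rfl, hlb⟩ := lbN_decomp s hs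
  rw [hlb] at h2
  set r := p - 2 ^ k * m with hr
  have hr0 : 0 < r := by omega
  have hrk : r < 2 ^ k := by omega
  obtain ⟨j, m'', hm'', he, _⟩ := lbN_decomp r hr0
  have h2jr : 2 ^ j ≤ r := by
    calc 2 ^ j ≤ 2 ^ j * m'' := Nat.le_mul_of_pos_right _ (by omega)
    _ = r := he.symm
  have hjk : j < k := by
    have hlt : (2:Nat) ^ j < 2 ^ k := by omega
    exact (Nat.pow_lt_pow_iff_right (by norm_num)).mp hlt
  have hsplit : (2:Nat) ^ k = 2 ^ j * 2 ^ (k - j) := by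
    rw [← pow_add]
    congr 1
    omega
  have hodd : (2 ^ (k - j) * m + m'') % 2 = 1 := by
    obtain ⟨c, hc⟩ : (2:Nat) ∣ 2 ^ (k - j) := dvd_pow_self 2 (by omega)
    have h2 : 2 ^ (k - j) * m = 2 * (c * m) := by rw [hc]; ring
    rw [h2]
    omega
  have hp : p = 2 ^ j * (2 ^ (k - j) * m + m'') := by
    have hpr : p = 2 ^ k * m + r := by omega
    rw [hpr, he, hsplit]
    ring
  have hlbp : lbN p = 2 ^ j := by
    rw [hp]
    exact lbN_two_pow_mul j _ hodd
  rw [hlbp]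
  exact le_trans h2jr (by omega)

-- ---- getD / set bookkeeping ----

theorem getD_set_eq (l : List Int) (q p : Nat) (v : Int) :
    (l.set q v).getD p 0 = if q = p ∧ q < l.length then v else l.getD p 0 := by
  by_cases hqp : q = p
  · subst hqp
    by_cases hql : q < l.length
    · simp [List.getD, List.getElem?_set, hql]
    · have hset : l.set q v = l := List.set_eq_of_length_le (by omega)
      simp [hset, hql]
  · simp [List.getD, List.getElem?_set, hqp]

-- ---- the Fenwick-tree invariant and the specs of addAux / queryAux ----

def FenInv (t : List Int) (c : Int → Int) : Prop :=
  t.length = 100005 ∧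
  ∀ p : Nat, 1 ≤ p → p < 100005 →
    t.getD p 0 = ∑ y ∈ Finset.Ioc ((p : Int) - (lbN p : Nat)) (p : Int), c y

theorem Ioc_disj (a b c : Int) : Disjoint (Finset.Ioc a b) (Finset.Ioc b c) := by
  rw [Finset.disjoint_left]
  intro y hy1 hy2
  rw [Finset.mem_Ioc] at hy1 hy2
  omega

theorem queryAux_spec (t : List Int) (c : Int → Int) (h : FenInv t c) :
    ∀ x : Int, x < 100005 → ∀ acc, queryAux t x acc = acc + ∑ y ∈ Finset.Ioc 0 x, c y := by
  obtain ⟨hlen, hval⟩ := h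
  suffices H : ∀ n : Nat, ∀ x : Int, x.toNat = n → x < 100005 → ∀ acc,
      queryAux t x acc = acc + ∑ y ∈ Finset.Ioc 0 x, c y by
    exact fun x hx acc => H x.toNat x rfl hx acc
  intro n
  induction n using Nat.strong_induction_on with
  | _ n IH =>
    intro x hxn hx acc
    by_cases hpos : 0 < x
    · rw [queryAux, dif_pos hpos]
      have hx1 : (1:Int) ≤ x := hpos
      have hlb1 : 1 ≤ lowbit x := lowbit_pos x hx1
      have hlble : lowbit x ≤ x := lowbit_le x hx1
      have heq := lowbit_eq_lbN x hx1
      have hxl : x.toNat < 100005 := by omega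
      have hxl1 : 1 ≤ x.toNat := by omega
      have hrec := IH (x - lowbit x).toNat (by omega) (x - lowbit x) rfl (by omega)
        (acc + PySem.List.pyGetD t x 0)
      rw [hrec]
      have hget : PySem.List.pyGetD t x 0 = t.getD x.toNat 0 := by
        rw [PySem.List.pyGetD_eq_getElem t 0 (by omega) (by rw [hlen]; exact_mod_cast hx)]
        rw [List.getD_eq_getElem _ _ (by omega)]
      rw [hget, hval x.toNat hxl1 hxl]
      have hcast : ((x.toNat : Nat) : Int) = x := by omega
      have hlbcast : x - lowbit x = (x.toNat : Int) - (lbN x.toNat : Nat) := by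
        rw [heq]; omega
      have hle1 : (0:Int) ≤ (x.toNat : Int) - (lbN x.toNat : Nat) := by
        have := lbN_le x.toNat
        omega
      have hle2 : ((x.toNat : Int) - (lbN x.toNat : Nat)) ≤ (x.toNat : Int) := by
        have := lbN_pos x.toNat hxl1
        omega
      rw [hlbcast, ← hcast]
      rw [← Finset.Ioc_union_Ioc_eq_Ioc hle1 hle2, Finset.sum_union (Ioc_disj _ _ _)]
      simp only [Int.toNat_natCast]
      ring
    · rw [queryAux, dif_neg hpos]
      have hempty : Finset.Ioc (0:Int) x = ∅ := Finset.Ioc_eq_empty (by omega)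
      simp [hempty]

theorem addAux_noop (t : List Int) (x δ : Int) (h : 100005 ≤ x) : addAux t x δ = t := by
  rw [addAux, dif_neg]
  omega

theorem addAux_go (δ s : Int) (hs : 1 ≤ s) (g : Nat → Int) :
    ∀ (x : Int) (t : List Int), t.length = 100005 → s ≤ x → x - lowbit x < s →
    (∀ p : Nat, 1 ≤ p → p < 100005 →
      t.getD p 0 = g p + (if (p : Int) - (lbN p : Nat) < s ∧ s ≤ p ∧ (p : Int) < x then δ else 0)) →
    (addAux t x δ).length = 100005 ∧
    ∀ p : Nat, 1 ≤ p → p < 100005 →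
      (addAux t x δ).getD p 0 = g p + (if (p : Int) - (lbN p : Nat) < s ∧ s ≤ p then δ else 0) := by
  suffices H : ∀ n : Nat, ∀ (x : Int), (100005 - x).toNat = n → ∀ (t : List Int),
      t.length = 100005 → s ≤ x → x - lowbit x < s →
      (∀ p : Nat, 1 ≤ p → p < 100005 →
        t.getD p 0 = g p + (if (p : Int) - (lbN p : Nat) < s ∧ s ≤ p ∧ (p : Int) < x then δ else 0)) →
      (addAux t x δ).length = 100005 ∧
      ∀ p : Nat, 1 ≤ p → p < 100005 →
        (addAux t x δ).getD p 0 = g p + (if (p : Int) - (lbN p : Nat) < s ∧ s ≤ p then δ else 0) by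
    exact fun x t h1 h2 h3 h4 => H (100005 - x).toNat x rfl t h1 h2 h3 h4
  intro n
  induction n using Nat.strong_induction_on with
  | _ n IH =>
    intro x hxn t hlen hsx hcont ht
    have hx1 : (1:Int) ≤ x := le_trans hs hsx
    by_cases hxb : x < 100005
    · rw [addAux, dif_pos ⟨hxb, hx1⟩]
      have hlb1 : 1 ≤ lowbit x := lowbit_pos x hx1
      have hlble : lowbit x ≤ x := lowbit_le x hx1
      have heq := lowbit_eq_lbN x hx1
      have hpx1 : 1 ≤ x.toNat := by omega
      have hpxb : x.toNat < 100005 := by omega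
      have hget : PySem.List.pyGetD t x 0 = t.getD x.toNat 0 := by
        rw [PySem.List.pyGetD_eq_getElem t 0 (by omega) (by rw [hlen]; exact_mod_cast hxb)]
        rw [List.getD_eq_getElem _ _ (by omega)]
      have hset : PySem.List.pySetD t x (PySem.List.pyGetD t x 0 + δ)
          = t.set x.toNat (t.getD x.toNat 0 + δ) := by
        rw [PySem.List.pySetD_of_nonneg t _ (by omega), hget]
      rw [hset]
      have heqlb' : lowbit (x + lowbit x) = ((lbN (x + lowbit x).toNat : Nat) : Int) :=
        lowbit_eq_lbN _ (by omega)
      have htn : (x + lowbit x).toNat = x.toNat + lbN x.toNat := by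
        rw [heq]; omega
      have hnest := lbN_nest x.toNat (by omega)
      have hlbleN := lbN_le x.toNat
      have hlble' := lbN_le (x.toNat + lbN x.toNat)
      apply IH (100005 - (x + lowbit x)).toNat (by omega) (x + lowbit x) rfl
        _ (by simpa using hlen) (by omega)
      · rw [heqlb', htn, heq]
        omega
      · intro p hp1 hp2
        rw [getD_set_eq]
        by_cases hpq : x.toNat = p
        · subst hpq
          rw [if_pos ⟨rfl, by omega⟩]
          rw [ht x.toNat hp1 hp2]
          have hcond1 : ¬ ((x.toNat : Int) - (lbN x.toNat : Nat) < s ∧ s ≤ (x.toNat : Int) ∧ (x.toNat : Int) < x) := by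
            omega
          have hcond2 : ((x.toNat : Int) - (lbN x.toNat : Nat) < s ∧ s ≤ (x.toNat : Int) ∧ (x.toNat : Int) < x + lowbit x) := by
            rw [heq] at hcont ⊢
            refine ⟨by omega, by omega, by omega⟩
          rw [if_neg hcond1, if_pos hcond2]
          ring
        · rw [if_neg (by tauto)]
          rw [ht p hp1 hp2]
          congr 1
          by_cases hplt : (p : Int) < x
          · have hplt2 : (p : Int) < x + lowbit x := by omega
            simp only [hplt, hplt2, and_true]
          · have hpgt : x < (p : Int) := by
              rcases lt_or_eq_of_le (not_lt.mp hplt) with h | h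
              · exact h
              · exfalso; apply hpq; omega
            by_cases hplt' : (p : Int) < x + lowbit x
            · have hbet := lbN_between x.toNat p (by omega) (by omega) (by rw [heq] at hplt'; omega)
              have hnc : ¬ ((p : Int) - (lbN p : Nat) < s) := by
                have h2 := lbN_le p
                omega
              simp only [hnc, false_and, if_false]
            · simp only [hplt, hplt', and_false]
    · rw [addAux, dif_neg (by omega)]
      refine ⟨hlen, fun p hp1 hp2 => ?_⟩
      rw [ht p hp1 hp2]
      congr 1
      have hpx : (p : Int) < x := by omega
      simp only [hpx, and_true]

theorem addAux_inv (t : List Int) (c : Int → Int) (s δ : Int) (h : FenInv t c) (hs : 1 ≤ s) :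
    FenInv (addAux t s δ) (fun y => c y + if y = s then δ else 0) := by
  obtain ⟨hlen, hval⟩ := h
  have hcont : s - lowbit s < s := by
    have := lowbit_pos s hs; omega
  have H := addAux_go δ s hs
    (fun p => ∑ y ∈ Finset.Ioc ((p : Int) - (lbN p : Nat)) (p : Int), c y)
    s t hlen le_rfl hcont
    (by
      intro p hp1 hp2
      rw [hval p hp1 hp2]
      have hno : ¬ ((p : Int) - (lbN p : Nat) < s ∧ s ≤ (p : Int) ∧ (p : Int) < s) := by omega
      rw [if_neg hno]
      ring)
  refine ⟨H.1, fun p hp1 hp2 => ?_⟩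
  rw [H.2 p hp1 hp2]
  rw [Finset.sum_add_distrib, Finset.sum_ite_eq' _ s (fun _ => δ)]
  congr 1
  simp [Finset.mem_Ioc]

-- ---- the lexicographic order used by Python's tuple sort ----

-- the strict-before test sorted2 people Prod.fst Prod.snd false inserts with
def blex (a b : Int × Int) : Bool :=
  decide (a.1 < b.1) || !decide (b.1 < a.1) && decide (a.2 < b.2)

theorem blex_true_iff (a b : Int × Int) :
    blex a b = true ↔ (a.1 < b.1 ∨ (a.1 = b.1 ∧ a.2 < b.2)) := by
  unfold blex
  simp only [Bool.or_eq_true, Bool.and_eq_true, Bool.not_eq_true', decide_eq_true_eq,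
    decide_eq_false_iff_not]
  omega

theorem insertBy_blex_pairwise (x : Int × Int) (ys : List (Int × Int))
    (h : ys.Pairwise (fun a b => blex b a = false)) :
    (PySem.List.insertBy blex x ys).Pairwise (fun a b => blex b a = false) := by
  induction ys with
  | nil =>
    simp [PySem.List.insertBy]
  | cons y ys ih =>
    rw [List.pairwise_cons] at h
    show (if blex x y = true then x :: y :: ys else y :: PySem.List.insertBy blex x ys).Pairwise _
    by_cases hb : blex x y = true
    · rw [if_pos hb]
      rw [List.pairwise_cons]
      constructor
      · intro z hz
        rcases List.mem_cons.mp hz with rfl | hz2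
        · -- blex y x = false: asymmetry
          rw [Bool.eq_false_iff]
          intro hyx
          rw [blex_true_iff] at hb hyx
          omega
        · -- blex z x = false via h.1 z hz2 : blex z y = false and blex x y = true
          have hzy := h.1 z hz2
          rw [Bool.eq_false_iff]
          intro hzx
          rw [blex_true_iff] at hb hzx
          rw [Bool.eq_false_iff] at hzy
          apply hzy
          rw [blex_true_iff]
          omega
      · exact List.pairwise_cons.mpr ⟨h.1, h.2⟩
    · rw [if_neg hb]
      rw [List.pairwise_cons]
      refine ⟨?_, ih h.2⟩
      intro z hz
      rcases (PySem.List.insertBy_mem_iff blex x z ys).mp hz with rfl | hz2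
      · exact Bool.eq_false_iff.mpr (fun hc => hb hc)
      · exact h.1 z hz2

theorem foldl_insertBy_blex_pairwise (xs : List (Int × Int)) :
    ∀ acc : List (Int × Int), acc.Pairwise (fun a b => blex b a = false) →
    (xs.foldl (fun acc x => PySem.List.insertBy blex x acc) acc).Pairwise
      (fun a b => blex b a = false) := by
  induction xs with
  | nil => intro acc h; exact h
  | cons x xs ih =>
    intro acc h
    exact ih _ (insertBy_blex_pairwise x acc h)

theorem sorted2_blex_pairwise (xs : List (Int × Int)) :
    (PySem.List.sorted2 xs Prod.fst Prod.snd false).Pairwise (fun a b => blex b a = false) :=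
  foldl_insertBy_blex_pairwise xs [] List.Pairwise.nil

-- under Pre_, every element of the sorted list except the head has salary - d ≤ 100005
theorem tail_salary_bound (people : List (Int × Int)) (k d : Int)
    (hpre : Pre_solve people k d) (hd0 : Int × Int) (tl : List (Int × Int))
    (hsp : PySem.List.sorted2 people Prod.fst Prod.snd false = hd0 :: tl) :
    ∀ q ∈ tl, q.2 - d ≤ 100005 := by
  intro q hq
  by_contra hbad
  have hperm : (PySem.List.sorted2 people Prod.fst Prod.snd false).Perm people :=
    PySem.List.sorted2_perm people Prod.fst Prod.snd false
  rw [hsp] at hperm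
  have hqmem : q ∈ people := hperm.subset (List.mem_cons_of_mem _ hq)
  obtain ⟨hcount, hall⟩ := hpre.2 q hqmem (by omega)
  have hhdmem : hd0 ∈ people := hperm.subset List.mem_cons_self
  have hpw := sorted2_blex_pairwise people
  rw [hsp, List.pairwise_cons] at hpw
  rcases hall hd0 hhdmem with heq | hlt
  · -- hd0 = q: q occurs at least twice, contradicting count = 1
    have h2 : people.count q ≥ 2 := by
      rw [← hperm.count_eq q, heq, List.count_cons_self]
      have : 1 ≤ tl.count q := List.count_pos_iff.mpr hq
      omega
    omega
  · -- q strictly below the sorted head: contradicts sortedness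
    have hfalse := hpw.1 q hq
    rw [Bool.eq_false_iff] at hfalse
    apply hfalse
    rw [blex_true_iff]
    omega

-- ---- window counting ----

def cnt (w : List (Int × Int)) : Int → Int := fun y => ((w.map Prod.snd).count y : Int)

-- the salaries the Fenwick tree can actually hold (add is a no-op above 100004)
def keep (q : Int × Int) : Bool := decide (q.2 ≤ 100004)

theorem cnt_cons (q : Int × Int) (w : List (Int × Int)) (y : Int) :
    cnt (q :: w) y = cnt w y + if y = q.2 then 1 else 0 := by
  by_cases h : y = q.2
  · subst h
    simp [cnt, List.count_cons]
  · have hb : (q.2 == y) = false := by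
      simp only [beq_eq_false_iff_ne, ne_eq]
      intro hh
      exact h hh.symm
    simp [cnt, List.count_cons, hb, h]

theorem cnt_snoc (w : List (Int × Int)) (q : Int × Int) (y : Int) :
    cnt (w ++ [q]) y = cnt w y + if y = q.2 then 1 else 0 := by
  simp only [cnt, List.map_append, List.count_append, List.map_cons, List.map_nil]
  by_cases h : y = q.2
  · subst h
    simp [List.count_cons]
  · have hb : (q.2 == y) = false := by
      simp only [beq_eq_false_iff_ne, ne_eq]
      intro hh
      exact h hh.symm
    simp [List.count_cons, hb, h]

theorem sum_Ioc_cnt (w : List (Int × Int)) (a b : Int) :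
    ∑ y ∈ Finset.Ioc a b, cnt w y
      = ((w.filter (fun q => decide (a < q.2) && decide (q.2 ≤ b))).length : Int) := by
  induction w with
  | nil => simp [cnt]
  | cons q w ih =>
    rw [Finset.sum_congr rfl (fun y _ => cnt_cons q w y), Finset.sum_add_distrib, ih,
      Finset.sum_ite_eq' _ q.2 (fun _ => (1:Int))]
    rw [List.filter_cons]
    by_cases h : a < q.2 ∧ q.2 ≤ b
    · rw [if_pos (Finset.mem_Ioc.mpr h)]
      have hb : (decide (a < q.2) && decide (q.2 ≤ b)) = true := by
        simp [h.1, h.2]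
      simp [hb]
    · rw [if_neg (by rw [Finset.mem_Ioc]; exact h)]
      have hb : (decide (a < q.2) && decide (q.2 ≤ b)) = false := by
        rcases not_and_or.mp h with h1 | h1 <;> simp [h1] <;> omega
      simp [hb]

theorem foldB_eq (w : List (Int × Int)) (lo hi : Int) :
    ∀ ans : Int,
    w.foldl (fun a q => let a' := if q.2 ≤ hi then a + 1 else a; if q.2 < lo then a' - 1 else a') ans
      = ans + ((w.filter (fun q => decide (q.2 ≤ hi))).length : Int)
            - ((w.filter (fun q => decide (q.2 < lo))).length : Int) := by
  induction w with
  | nil => intro ans; simp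
  | cons q w ih =>
    intro ans
    rw [List.foldl_cons, ih]
    simp only [List.filter_cons]
    by_cases h1 : q.2 ≤ hi <;> by_cases h2 : q.2 < lo <;>
      simp [h1, h2] <;> push_cast <;> ring

-- the two Fenwick prefix sums over the kept window equal B's two direct counts
theorem sum_keep_hi (w : List (Int × Int)) (hi : Int) (hsal : ∀ q ∈ w, 1 ≤ q.2)
    (hhi : hi ≤ 100004) :
    ∑ y ∈ Finset.Ioc 0 hi, cnt (w.filter keep) y
      = ((w.filter (fun q => decide (q.2 ≤ hi))).length : Int) := by
  rw [sum_Ioc_cnt, List.filter_filter]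
  congr 2
  apply List.filter_congr
  intro q hq
  have hq1 := hsal q hq
  by_cases h : q.2 ≤ hi
  · have h1 : (0:Int) < q.2 := by omega
    have h2 : q.2 ≤ (100004:Int) := by omega
    simp [keep, h, h1, h2]
  · simp [h]

theorem sum_keep_lo (w : List (Int × Int)) (lo : Int) (hsal : ∀ q ∈ w, 1 ≤ q.2)
    (hlo : lo ≤ 100005) :
    ∑ y ∈ Finset.Ioc 0 (lo - 1), cnt (w.filter keep) y
      = ((w.filter (fun q => decide (q.2 < lo))).length : Int) := by
  rw [sum_Ioc_cnt, List.filter_filter]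
  congr 2
  apply List.filter_congr
  intro q hq
  have hq1 := hsal q hq
  by_cases h : q.2 < lo
  · have h1 : (0:Int) < q.2 := by omega
    have h2 : q.2 ≤ lo - 1 := by omega
    have h3 : q.2 ≤ (100004:Int) := by omega
    simp [keep, h, h1, h2, h3]
  · have h2 : ¬ q.2 ≤ lo - 1 := by omega
    simp [h, h2]

-- ---- main loop simulation ----

def window (sp : List (Int × Int)) (a b : Nat) : List (Int × Int) := (sp.drop a).take (b - a)

theorem window_cons (sp : List (Int × Int)) (a b : Nat) (hab : a < b) (hb : a < sp.length) :
    window sp a b = sp[a] :: window sp (a + 1) b := by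
  unfold window
  rw [List.drop_eq_getElem_cons hb]
  have h1 : b - a = (b - (a + 1)) + 1 := by omega
  rw [h1, List.take_succ_cons]

theorem window_snoc (sp : List (Int × Int)) (a b : Nat) (hab : a ≤ b) (hb : b < sp.length) :
    window sp a (b + 1) = window sp a b ++ [sp[b]] := by
  unfold window
  have h1 : b + 1 - a = (b - a) + 1 := by omega
  rw [h1, List.take_succ]
  congr 1
  rw [List.getElem?_drop]
  have h4 : a + (b - a) = b := by omega
  rw [h4, List.getElem?_eq_getElem hb]
  simp

theorem mem_window (sp : List (Int × Int)) (a b : Nat) (q : Int × Int) (h : q ∈ window sp a b) :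
    q ∈ sp :=
  List.mem_of_mem_drop (List.mem_of_mem_take h)

theorem adv_sim (sp : List (Int × Int)) (i T : Int) (hin : i ≤ sp.length)
    (hsal : ∀ q ∈ sp, 1 ≤ q.2) :
    ∀ (ptr : Int) (t : List Int), 0 ≤ ptr → ptr ≤ i →
    FenInv t (cnt ((window sp ptr.toNat i.toNat).filter keep)) →
    (advanceA sp i T ptr t).1 = advanceB sp i T ptr ∧
    ptr ≤ advanceB sp i T ptr ∧ advanceB sp i T ptr ≤ i ∧
    FenInv (advanceA sp i T ptr t).2
      (cnt ((window sp (advanceB sp i T ptr).toNat i.toNat).filter keep)) := by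
  suffices H : ∀ n : Nat, ∀ (ptr : Int), (i - ptr).toNat = n → ∀ (t : List Int), 0 ≤ ptr → ptr ≤ i →
      FenInv t (cnt ((window sp ptr.toNat i.toNat).filter keep)) →
      (advanceA sp i T ptr t).1 = advanceB sp i T ptr ∧
      ptr ≤ advanceB sp i T ptr ∧ advanceB sp i T ptr ≤ i ∧
      FenInv (advanceA sp i T ptr t).2
        (cnt ((window sp (advanceB sp i T ptr).toNat i.toNat).filter keep)) by
    exact fun ptr t h1 h2 h3 => H (i - ptr).toNat ptr rfl t h1 h2 h3
  intro n
  induction n using Nat.strong_induction_on with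
  | _ n IH =>
    intro ptr hptrn t hptr0 hptri hinv
    by_cases hc : ptr < i ∧ (PySem.List.pyGetD sp ptr (0, 0)).1 < T
    · rw [advanceA, dif_pos hc, advanceB, dif_pos hc]
      have hptl : ptr.toNat < sp.length := by omega
      have hq : PySem.List.pyGetD sp ptr (0, 0) = sp[ptr.toNat] := by
        rw [PySem.List.pyGetD_eq_getElem sp (0,0) hptr0 (by exact_mod_cast by omega)]
      have hmem : sp[ptr.toNat] ∈ sp := List.getElem_mem _
      have hq2 : 1 ≤ sp[ptr.toNat].2 := hsal _ hmem
      have hwc : window sp ptr.toNat i.toNat = sp[ptr.toNat] :: window sp (ptr.toNat + 1) i.toNat :=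
        window_cons sp ptr.toNat i.toNat (by omega) hptl
      have htn : (ptr + 1).toNat = ptr.toNat + 1 := by omega
      have hinv' : FenInv (addAux t (PySem.List.pyGetD sp ptr (0, 0)).2 (-1))
          (cnt ((window sp (ptr + 1).toNat i.toNat).filter keep)) := by
        rw [hq, htn]
        by_cases hk : keep sp[ptr.toNat] = true
        · -- the removed salary is in the tree
          have hfc : (window sp ptr.toNat i.toNat).filter keep
              = sp[ptr.toNat] :: (window sp (ptr.toNat + 1) i.toNat).filter keep := by
            rw [hwc, List.filter_cons, if_pos hk]
          have h1 := addAux_inv t (cnt ((window sp ptr.toNat i.toNat).filter keep))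
            sp[ptr.toNat].2 (-1) hinv hq2
          have h2 : (fun y => cnt ((window sp ptr.toNat i.toNat).filter keep) y
              + if y = sp[ptr.toNat].2 then (-1:Int) else 0)
              = cnt ((window sp (ptr.toNat + 1) i.toNat).filter keep) := by
            funext y
            rw [hfc, cnt_cons]
            split_ifs <;> omega
          rw [h2] at h1
          exact h1
        · -- salary ≥ 100005: the tree never held it, the add is a no-op
          have hk2 : (100005:Int) ≤ sp[ptr.toNat].2 := by
            simp only [keep, decide_eq_true_eq] at hk
            omega
          have hfc : (window sp ptr.toNat i.toNat).filter keep
              = (window sp (ptr.toNat + 1) i.toNat).filter keep := by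
            rw [hwc, List.filter_cons, if_neg hk]
          rw [addAux_noop _ _ _ hk2, ← hfc]
          exact hinv
      obtain ⟨c1, c2, c3, c4⟩ := IH (i - (ptr + 1)).toNat (by omega) (ptr + 1) rfl _
        (by omega) (by omega) hinv'
      exact ⟨c1, by omega, c3, c4⟩
    · rw [advanceA, dif_neg hc, advanceB, dif_neg hc]
      exact ⟨rfl, le_refl _, hptri, hinv⟩

theorem step_pair (sp : List (Int × Int)) (k d : Int)
    (hsal : ∀ q ∈ sp, 1 ≤ q.2)
    (i ptr ans : Int) (t : List Int)
    (hilt : i < sp.length)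
    (hbdi : (PySem.List.pyGetD sp i (0, 0)).2 - d ≤ 100005)
    (hptr0 : 0 ≤ ptr) (hptri : ptr ≤ i)
    (hinv : FenInv t (cnt ((window sp ptr.toNat i.toNat).filter keep))) :
    stepA sp k d (ptr, ans, t) i
      = ((stepB sp k d (ptr, ans) i).1, (stepB sp k d (ptr, ans) i).2,
         (stepA sp k d (ptr, ans, t) i).2.2) ∧
    0 ≤ (stepB sp k d (ptr, ans) i).1 ∧ (stepB sp k d (ptr, ans) i).1 ≤ i ∧
    FenInv (stepA sp k d (ptr, ans, t) i).2.2
      (cnt ((window sp (stepB sp k d (ptr, ans) i).1.toNat (i + 1).toNat).filter keep)) := by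
  set T := PySem.Int.floordiv (PySem.List.pyGetD sp i (0, 0)).1 2 - k with hT
  set salary := (PySem.List.pyGetD sp i (0, 0)).2 with hsala
  have hitl : i.toNat < sp.length := by omega
  have hgi : PySem.List.pyGetD sp i (0, 0) = sp[i.toNat] := by
    rw [PySem.List.pyGetD_eq_getElem sp (0,0) (by omega) (by exact_mod_cast hilt)]
  have hmemi : sp[i.toNat] ∈ sp := List.getElem_mem _
  have hsali : 1 ≤ salary := by rw [hsala, hgi]; exact hsal _ hmemi
  obtain ⟨hfst, hple, hpub, hinv'⟩ := adv_sim sp i T (by omega) hsal ptr t hptr0 hptri hinv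
  have hP0 : 0 ≤ advanceB sp i T ptr := le_trans hptr0 hple
  have haA : stepA sp k d (ptr, ans, t) i
      = ((advanceA sp i T ptr t).1,
         ans + queryAux (advanceA sp i T ptr t).2 (min (100005 - 1) (salary + d)) 0
             - queryAux (advanceA sp i T ptr t).2 (max 0 (salary - d) - 1) 0,
         addAux (advanceA sp i T ptr t).2 salary 1) := rfl
  have haB : stepB sp k d (ptr, ans) i
      = (advanceB sp i T ptr,
         (PySem.List.slice sp (some (advanceB sp i T ptr)) (some i)).foldl
           (fun a q =>
             let a' := if q.2 ≤ min (100005 - 1) (salary + d) then a + 1 else a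
             if q.2 < max 0 (salary - d) then a' - 1 else a') ans) := rfl
  have hslice : PySem.List.slice sp (some (advanceB sp i T ptr)) (some i)
      = window sp (advanceB sp i T ptr).toNat i.toNat := by
    rw [PySem.List.slice_toNat sp hP0 (by omega)]
    rfl
  have hwsal : ∀ q ∈ window sp (advanceB sp i T ptr).toNat i.toNat, 1 ≤ q.2 :=
    fun q hq => hsal q (mem_window sp _ _ q hq)
  have hansEq : ans + queryAux (advanceA sp i T ptr t).2 (min (100005 - 1) (salary + d)) 0
             - queryAux (advanceA sp i T ptr t).2 (max 0 (salary - d) - 1) 0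
      = (PySem.List.slice sp (some (advanceB sp i T ptr)) (some i)).foldl
           (fun a q =>
             let a' := if q.2 ≤ min (100005 - 1) (salary + d) then a + 1 else a
             if q.2 < max 0 (salary - d) then a' - 1 else a') ans := by
    rw [hslice, foldB_eq]
    rw [queryAux_spec _ _ hinv' (min (100005 - 1) (salary + d)) (by omega) 0]
    rw [queryAux_spec _ _ hinv' (max 0 (salary - d) - 1) (by omega) 0]
    rw [sum_keep_hi _ _ hwsal (by omega)]
    rw [sum_keep_lo _ _ hwsal (by omega)]
    ring
  have hsnoc : window sp (advanceB sp i T ptr).toNat (i + 1).toNat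
      = window sp (advanceB sp i T ptr).toNat i.toNat ++ [sp[i.toNat]] := by
    have htn : (i + 1).toNat = i.toNat + 1 := by omega
    rw [htn]
    exact window_snoc sp _ i.toNat (by omega) hitl
  have hinvN : FenInv (addAux (advanceA sp i T ptr t).2 salary 1)
      (cnt ((window sp (advanceB sp i T ptr).toNat (i + 1).toNat).filter keep)) := by
    by_cases hk : keep sp[i.toNat] = true
    · have hfc : (window sp (advanceB sp i T ptr).toNat (i + 1).toNat).filter keep
          = (window sp (advanceB sp i T ptr).toNat i.toNat).filter keep ++ [sp[i.toNat]] := by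
        rw [hsnoc, List.filter_append, List.filter_cons, if_pos hk, List.filter_nil]
      have h1 := addAux_inv (advanceA sp i T ptr t).2
        (cnt ((window sp (advanceB sp i T ptr).toNat i.toNat).filter keep)) salary 1 hinv' hsali
      have h2 : (fun y => cnt ((window sp (advanceB sp i T ptr).toNat i.toNat).filter keep) y
          + if y = salary then (1:Int) else 0)
          = cnt ((window sp (advanceB sp i T ptr).toNat (i + 1).toNat).filter keep) := by
        funext y
        rw [hfc, cnt_snoc]
        have he : sp[i.toNat].2 = salary := by rw [hsala, hgi]
        rw [he]
      rw [h2] at h1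
      exact h1
    · have hk2 : (100005:Int) ≤ salary := by
        simp only [keep, decide_eq_true_eq] at hk
        rw [hsala, hgi]
        omega
      have hfc : (window sp (advanceB sp i T ptr).toNat (i + 1).toNat).filter keep
          = (window sp (advanceB sp i T ptr).toNat i.toNat).filter keep := by
        rw [hsnoc, List.filter_append, List.filter_cons, if_neg hk, List.filter_nil,
          List.append_nil]
      rw [addAux_noop _ _ _ hk2, hfc]
      exact hinv'
  refine ⟨?_, ?_, ?_, ?_⟩
  · rw [haA, haB]
    simp only [Prod.mk.injEq]
    exact ⟨hfst, hansEq, trivial⟩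
  · rw [haB]; exact hP0
  · rw [haB]; exact hpub
  · rw [haA, haB]
    exact hinvN

theorem loop_sim (sp : List (Int × Int)) (k d : Int)
    (hsal : ∀ q ∈ sp, 1 ≤ q.2)
    (hbd : ∀ j : Nat, 1 ≤ j → ∀ (hj : j < sp.length), sp[j].2 - d ≤ 100005) :
    ∀ (i : Int), 1 ≤ i → i ≤ sp.length →
    ∀ (ptr ans : Int) (t : List Int), 0 ≤ ptr → ptr ≤ i →
    FenInv t (cnt ((window sp ptr.toNat i.toNat).filter keep)) →
    ((PySem.List.pyRange i sp.length 1).foldl (stepA sp k d) (ptr, ans, t)).2.1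
      = ((PySem.List.pyRange i sp.length 1).foldl (stepB sp k d) (ptr, ans)).2 := by
  suffices H : ∀ n : Nat, ∀ (i : Int), ((sp.length : Int) - i).toNat = n → 1 ≤ i → i ≤ sp.length →
      ∀ (ptr ans : Int) (t : List Int), 0 ≤ ptr → ptr ≤ i →
      FenInv t (cnt ((window sp ptr.toNat i.toNat).filter keep)) →
      ((PySem.List.pyRange i sp.length 1).foldl (stepA sp k d) (ptr, ans, t)).2.1
        = ((PySem.List.pyRange i sp.length 1).foldl (stepB sp k d) (ptr, ans)).2 by
    exact fun i h1 h2 ptr ans t h3 h4 h5 => H _ i rfl h1 h2 ptr ans t h3 h4 h5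
  intro n
  induction n using Nat.strong_induction_on with
  | _ n IH =>
    intro i hin hi1 hile ptr ans t hptr0 hptri hinv
    by_cases hilt : i < sp.length
    · rw [PySem.List.pyRange_one_cons (by exact_mod_cast hilt)]
      rw [List.foldl_cons, List.foldl_cons]
      have hbdi : (PySem.List.pyGetD sp i (0, 0)).2 - d ≤ 100005 := by
        rw [PySem.List.pyGetD_eq_getElem sp (0,0) (by omega) (by exact_mod_cast hilt)]
        exact hbd i.toNat (by omega) (by omega)
      obtain ⟨heq, h0, hub, hinvN⟩ := step_pair sp k d hsal i ptr ans t
        (by exact_mod_cast hilt) hbdi hptr0 hptri hinv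
      rw [heq]
      have := IH ((sp.length : Int) - (i + 1)).toNat (by omega) (i + 1) rfl (by omega)
        (by omega) (stepB sp k d (ptr, ans) i).1 (stepB sp k d (ptr, ans) i).2
        (stepA sp k d (ptr, ans, t) i).2.2 h0 (by omega) hinvN
      simpa using this
    · rw [PySem.List.pyRange_one_eq_nil (by exact_mod_cast by omega)]
      simp

-- ---- initial tree ----

theorem FenInv_zero : FenInv (List.replicate 100005 0) (fun _ => 0) := by
  refine ⟨List.length_replicate, fun p hp1 hp2 => ?_⟩
  rw [List.getD_replicate 0 hp2]
  simp

-- ===== VERDICT (by name: the statement is the Claim_ definition above) =====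
theorem solve_spec : Claim_equal_solve := by
  intro people k d hdom hpre
  show solve people k d = solve_alt people k d
  unfold solve solve_alt
  by_cases hpe : people = []
  · simp [hpe]
  · simp only [if_neg hpe]
    set sp := PySem.List.sorted2 people Prod.fst Prod.snd false with hsp
    have hperm : sp.Perm people := PySem.List.sorted2_perm people Prod.fst Prod.snd false
    have hsal : ∀ q ∈ sp, 1 ≤ q.2 := fun q hq => hpre.1 q (hperm.subset hq)
    have hlen : sp.length = people.length := hperm.length_eq
    have hne : sp ≠ [] := by
      intro h
      apply hpe
      rw [h] at hlen
      exact List.length_eq_zero_iff.mp hlen.symm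
    obtain ⟨hd0, tl, hcons⟩ : ∃ hd0 tl, sp = hd0 :: tl := by
      cases hsp2 : sp with
      | nil => exact absurd hsp2 hne
      | cons a l => exact ⟨a, l, rfl⟩
    have htail := tail_salary_bound people k d hpre hd0 tl (by rw [← hsp, hcons])
    have hbd : ∀ j : Nat, 1 ≤ j → ∀ (hj : j < sp.length), sp[j].2 - d ≤ 100005 := by
      intro j hj1 hj
      obtain ⟨j', rfl⟩ : ∃ j', j = j' + 1 := ⟨j - 1, by omega⟩
      have hj2 : j' < tl.length := by
        rw [hcons] at hj
        simpa using hj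
      have he : sp[j' + 1]'hj = tl[j'] := by
        simp only [List.getElem_of_eq hcons hj, List.getElem_cons_succ]
      rw [he]
      exact htail _ (List.getElem_mem hj2)
    have hn1 : 1 ≤ sp.length := List.length_pos_iff.mpr hne
    have hlen' : PySem.List.len sp = (sp.length : Int) := PySem.List.len_eq sp
    rw [hlen']
    have hs0 : (PySem.List.pyGetD sp 0 (0, 0)) = sp[0] := by
      rw [PySem.List.pyGetD_zero, List.getD_eq_getElem _ _ (by omega)]
      rfl
    have hs02 : 1 ≤ sp[0].2 := hsal _ (List.getElem_mem _)
    have hw01 : window sp 0 1 = [sp[0]] := by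
      have h01 := window_snoc sp 0 0 le_rfl (by omega)
      simp only [window, List.drop_zero, Nat.sub_zero, Nat.sub_self, List.take_zero,
        List.nil_append, Nat.zero_add] at h01 ⊢
      exact h01
    have hinv0 : FenInv (addAux (List.replicate 100005 0) (PySem.List.pyGetD sp 0 (0, 0)).2 1)
        (cnt ((window sp 0 1).filter keep)) := by
      rw [hs0]
      by_cases hk : keep sp[0] = true
      · have hfc : (window sp 0 1).filter keep = [sp[0]] := by
          rw [hw01, List.filter_cons, if_pos hk, List.filter_nil]
        have h1 := addAux_inv (List.replicate 100005 0) (fun _ => 0) sp[0].2 1 FenInv_zero hs02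
        have h2 : (fun y => (0:Int) + if y = sp[0].2 then (1:Int) else 0)
            = cnt ((window sp 0 1).filter keep) := by
          funext y
          rw [hfc]
          have hx := cnt_snoc [] sp[0] y
          simp only [List.nil_append] at hx
          rw [hx]
          simp [cnt]
        rw [h2] at h1
        exact h1
      · have hk2 : (100005:Int) ≤ sp[0].2 := by
          simp only [keep, decide_eq_true_eq] at hk
          omega
        have hfc : (window sp 0 1).filter keep = [] := by
          rw [hw01, List.filter_cons, if_neg hk, List.filter_nil]
        rw [addAux_noop _ _ _ hk2, hfc]
        have h2 : (fun _ : Int => (0:Int)) = cnt ([] : List (Int × Int)) := by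
          funext y; simp [cnt]
        rw [← h2]
        exact FenInv_zero
    have hmain := loop_sim sp k d hsal hbd 1 le_rfl (by exact_mod_cast hn1) 0 0 _ le_rfl
      (by norm_num) hinv0
    exact congrArg (fun z => PySem.Int.mod z 1000000007) hmain
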